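-- pv_equiv track=rewrite | github.com/posicks/Fibonacci-Microservice | fibonacci/fibonacci.py | fibonacci_matrix
-- ===== SOURCE A (Python) =====
-- FIBONACCI_START_MATRIX = [[1, 1], [1, 0]]
--
-- def matrix_muliply(A, B):
--     result = [[0, 0], [0, 0]]
--
--     m1Rows = len(A[0])
--     m1Columns = len(B[0])
--
--     for ARow in range(m1Rows):
--         # iterate through columns of matrix A
--         for BColumn in range(m1Columns):
--             # iterate through rows of matrix B
--             for index in range(m1Columns):
--                 result[ARow][BColumn] += (A[ARow][index] * B[index][BColumn])
--
--     return result
--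
-- def matrix_power(A, n):
--     if n <= 1:
--         return A
--
--     result = [[1, 0], [0, 1]]
--
--     '''
--     Exponentiation by squaring
--     '''
--     while n != 0:
--         if (n & 0x01) != 0:
--             result = matrix_muliply(result, A)
--
--         n = n >> 1
--         A = matrix_muliply(A, A)
--
--     return result
--
-- def fibonacci_matrix(start, length):
--     if start < 0:
--         raise ValueError('start must be greater than or equal to 0 (start >= 0)')
--     elif length < 1:
--         raise ValueError('length must be greater than 0 (length > 0)')
--
--
--     result = [0 for i in range(length)]
--     matrix = matrix_power(FIBONACCI_START_MATRIX, start)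
--
--     if start == 0:
--         result[0] = matrix[1][1]
--         if length > 1:
--             result[1] = matrix[0][1]
--     else:
--         result[0] = matrix[0][1]
--         if length > 1:
--             result[1] = matrix[0][0]
--
--     for i in range(2, length):
--         result[i] = result[i-1] + result[i-2]
--
--     return result
-- ===== SOURCE B (Python) =====
-- def fibonacci_matrix(start, length):
--     if start < 0:
--         raise ValueError('start must be greater than or equal to 0 (start >= 0)')
--     elif length < 1:
--         raise ValueError('length must be greater than 0 (length > 0)')
--     a, b = 0, 1
--     for _ in range(start):
--         a, b = b, a + b
--     out = []
--     for _ in range(length):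
--         out.append(a)
--         a, b = b, a + b
--     return out
-- ===== Notes on version B (the rewrite author's own statement) =====
-- stated objective: simpler
-- what changed: Replaces the 2x2 matrix exponentiation-by-squaring (matrix_power/matrix_muliply) plus array back-fill with a single linear rolling-pair iteration that walks the Fibonacci recurrence to index start and then emits the next length values.
import Mathlib
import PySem

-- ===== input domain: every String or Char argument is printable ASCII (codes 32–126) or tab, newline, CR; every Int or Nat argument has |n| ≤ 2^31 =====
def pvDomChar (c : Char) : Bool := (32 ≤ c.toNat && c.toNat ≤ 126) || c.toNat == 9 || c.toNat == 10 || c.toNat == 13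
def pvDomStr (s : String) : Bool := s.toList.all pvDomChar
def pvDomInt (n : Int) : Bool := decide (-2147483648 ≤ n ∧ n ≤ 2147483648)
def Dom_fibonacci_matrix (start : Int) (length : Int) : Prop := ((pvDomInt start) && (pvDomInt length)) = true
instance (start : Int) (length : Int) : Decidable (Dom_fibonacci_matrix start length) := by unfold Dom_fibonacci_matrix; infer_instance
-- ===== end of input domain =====

-- B replaces the matrix exponentiation-by-squaring with a plain linear rolling-pair walk
-- of the Fibonacci recurrence (simpler; not claimed faster).

-- ===== PORT A =====
-- A 2x2 integer matrix [[a,b],[c,d]] is ported as ((a,b),(c,d)); the triple for-loop of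
-- matrix_muliply runs over the fixed range(2), so it is unrolled into the eight products
-- it performs (exact on 2x2 inputs, the only ones A ever builds).
abbrev pvMat : Type := (Int × Int) × (Int × Int)

def matrix_muliply (A B : pvMat) : pvMat :=
  ((A.1.1 * B.1.1 + A.1.2 * B.2.1, A.1.1 * B.1.2 + A.1.2 * B.2.2),
   (A.2.1 * B.1.1 + A.2.2 * B.2.1, A.2.1 * B.1.2 + A.2.2 * B.2.2))

-- the `while n != 0` loop of matrix_power (n ≥ 2 there, halved each turn)
def matrix_power_loop (result A : pvMat) (n : Nat) : pvMat :=
  if n = 0 then result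
  else matrix_power_loop (if n % 2 = 1 then matrix_muliply result A else result)
    (matrix_muliply A A) (n / 2)

def matrix_power (A : pvMat) (n : Int) : pvMat :=
  if n ≤ 1 then A
  else matrix_power_loop ((1, 0), (0, 1)) A n.toNat

def pvFibStartMatrix : pvMat := ((1, 1), (1, 0))

def fibonacci_matrix (start : Int) (length : Int) : List Int :=
  if start < 0 then []            -- raise ValueError (outside Pre_)
  else if length < 1 then []      -- raise ValueError (outside Pre_)
  else
    let result := List.replicate length.toNat (0 : Int)
    let matrix := matrix_power pvFibStartMatrix start
    let result :=
      if start = 0 then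
        let r := result.set 0 matrix.2.2
        if length > 1 then r.set 1 matrix.1.2 else r
      else
        let r := result.set 0 matrix.1.2
        if length > 1 then r.set 1 matrix.1.1 else r
    (PySem.List.pyRange 2 length 1).foldl
      (fun res i => res.set i.toNat (res.getD (i - 1).toNat 0 + res.getD (i - 2).toNat 0))
      result

-- ===== PORT B =====
-- for _ in range(start): a, b = b, a + b
def fibStep : Nat → Int × Int → Int × Int
  | 0, p => p
  | k + 1, p => fibStep k (p.2, p.1 + p.2)

-- for _ in range(length): out.append(a); a, b = b, a + b
def fibCollect : Nat → Int × Int → List Int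
  | 0, _ => []
  | k + 1, p => p.1 :: fibCollect k (p.2, p.1 + p.2)

def fibonacci_matrix_alt (start : Int) (length : Int) : List Int :=
  if start < 0 then []            -- raise ValueError (outside Pre_)
  else if length < 1 then []      -- raise ValueError (outside Pre_)
  else fibCollect length.toNat (fibStep start.toNat (0, 1))

-- ===== PRECONDITION & SPEC =====
-- Pre_ excludes exactly the inputs where A raises ValueError: start < 0 or length < 1.
def Pre_fibonacci_matrix (start : Int) (length : Int) : Prop := 0 ≤ start ∧ 1 ≤ length
instance (start : Int) (length : Int) : Decidable (Pre_fibonacci_matrix start length) := by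
  unfold Pre_fibonacci_matrix; infer_instance

def pvWitness_fibonacci_matrix : Int × Int := (3, 4)

def Spec_fibonacci_matrix (start : Int) (length : Int) (out : List Int) : Prop :=
  out = fibonacci_matrix_alt start length
instance (start : Int) (length : Int) (out : List Int) : Decidable (Spec_fibonacci_matrix start length out) := by
  unfold Spec_fibonacci_matrix; infer_instance

-- ===== CLAIM (what is proved, stated in full; the proofs are below) =====
def Claim_equal_fibonacci_matrix : Prop := ∀ (start : Int) (length : Int), Dom_fibonacci_matrix start length → Pre_fibonacci_matrix start length → Spec_fibonacci_matrix start length (fibonacci_matrix start length)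

-- ===== LEMMAS AND PROOFS =====

theorem fibStep_succ_last (k : Nat) (p : Int × Int) :
    fibStep (k + 1) p = ((fibStep k p).2, (fibStep k p).1 + (fibStep k p).2) := by
  induction k generalizing p with
  | zero => rfl
  | succ k ih =>
    rw [show fibStep (k + 1 + 1) p = fibStep (k + 1) (p.2, p.1 + p.2) from rfl,
      show fibStep (k + 1) p = fibStep k (p.2, p.1 + p.2) from rfl, ih]

theorem fibStep_rec (k : Nat) (p : Int × Int) :
    (fibStep (k + 2) p).1 = (fibStep (k + 1) p).1 + (fibStep k p).1 := by
  rw [fibStep_succ_last (k + 1) p, fibStep_succ_last k p]; simp; ring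

def mpow (A : pvMat) : Nat → pvMat
  | 0 => ((1, 0), (0, 1))
  | n + 1 => matrix_muliply (mpow A n) A

theorem mmul_assoc (A B C : pvMat) :
    matrix_muliply (matrix_muliply A B) C = matrix_muliply A (matrix_muliply B C) := by
  simp only [matrix_muliply, Prod.mk.injEq]
  refine ⟨⟨by ring, by ring⟩, by ring, by ring⟩

theorem mmul_one (A : pvMat) : matrix_muliply A ((1, 0), (0, 1)) = A := by
  obtain ⟨⟨a, b⟩, c, d⟩ := A
  simp only [matrix_muliply, Prod.mk.injEq]
  refine ⟨⟨by ring, by ring⟩, by ring, by ring⟩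

theorem one_mmul (A : pvMat) : matrix_muliply ((1, 0), (0, 1)) A = A := by
  obtain ⟨⟨a, b⟩, c, d⟩ := A
  simp only [matrix_muliply, Prod.mk.injEq]
  refine ⟨⟨by ring, by ring⟩, by ring, by ring⟩

theorem mmul_mpow_comm (A : pvMat) (n : Nat) :
    matrix_muliply A (mpow A n) = matrix_muliply (mpow A n) A := by
  induction n with
  | zero => rw [mpow, mmul_one, one_mmul]
  | succ n ih => rw [mpow, ← mmul_assoc, ih]

theorem mpow_sq (A : pvMat) (k : Nat) : mpow (matrix_muliply A A) k = mpow A (2 * k) := by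
  induction k with
  | zero => rfl
  | succ k ih =>
    rw [mpow, ih, show 2 * (k + 1) = 2 * k + 1 + 1 from rfl, mpow, mpow, mmul_assoc]

theorem matrix_power_loop_spec (n : Nat) : ∀ (r A : pvMat),
    matrix_power_loop r A n = matrix_muliply r (mpow A n) := by
  induction n using Nat.strong_induction_on with
  | _ n ih =>
    intro r A
    rw [matrix_power_loop]
    by_cases h0 : n = 0
    · simp [h0, mpow, mmul_one]
    · simp only [if_neg h0]
      rw [ih (n / 2) (Nat.div_lt_self (Nat.pos_of_ne_zero h0) one_lt_two), mpow_sq]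
      by_cases hodd : n % 2 = 1
      · have h2 : n = 2 * (n / 2) + 1 := by omega
        simp only [if_pos hodd]
        rw [mmul_assoc, mmul_mpow_comm,
          show matrix_muliply (mpow A (2 * (n / 2))) A = mpow A (2 * (n / 2) + 1) from rfl, ← h2]
      · have h2 : n = 2 * (n / 2) := by omega
        simp only [if_neg hodd]
        rw [← h2]

theorem mpow_fib (k : Nat) :
    mpow pvFibStartMatrix k =
      (((fibStep k (0, 1)).2, (fibStep k (0, 1)).1),
       ((fibStep k (0, 1)).1, (fibStep k (0, 1)).2 - (fibStep k (0, 1)).1)) := by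
  induction k with
  | zero => rfl
  | succ k ih =>
    rw [mpow, ih, fibStep_succ_last]
    simp only [matrix_muliply, pvFibStartMatrix, Prod.mk.injEq]
    refine ⟨⟨by ring, by ring⟩, by ring, by ring⟩

theorem matrix_power_fib (s : Int) (hs : 2 ≤ s) :
    matrix_power pvFibStartMatrix s =
      (((fibStep s.toNat (0, 1)).2, (fibStep s.toNat (0, 1)).1),
       ((fibStep s.toNat (0, 1)).1, (fibStep s.toNat (0, 1)).2 - (fibStep s.toNat (0, 1)).1)) := by
  rw [matrix_power, if_neg (by omega), matrix_power_loop_spec, one_mmul, mpow_fib]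

theorem fibCollect_length (k : Nat) (p : Int × Int) : (fibCollect k p).length = k := by
  induction k generalizing p with
  | zero => rfl
  | succ k ih => simp [fibCollect, ih]

theorem fibCollect_getD (k i : Nat) (p : Int × Int) (hi : i < k) :
    (fibCollect k p).getD i 0 = (fibStep i p).1 := by
  induction k generalizing p i with
  | zero => omega
  | succ k ih =>
    cases i with
    | zero => rfl
    | succ i =>
      simp only [fibCollect, List.getD_cons_succ]
      rw [ih i _ (by omega), fibStep]

theorem fibCollect_snoc (k : Nat) (p : Int × Int) :
    fibCollect (k + 1) p = fibCollect k p ++ [(fibStep k p).1] := by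
  induction k generalizing p with
  | zero => rfl
  | succ k ih =>
    show p.1 :: fibCollect (k + 1) (p.2, p.1 + p.2)
        = p.1 :: fibCollect k (p.2, p.1 + p.2) ++ [(fibStep (k + 1) p).1]
    rw [ih, show fibStep (k + 1) p = fibStep k (p.2, p.1 + p.2) from rfl]
    simp

-- the back-fill loop of A, starting from the first j entries already correct, fills the rest
theorem fill_spec (m : Nat) : ∀ (j : Nat) (p : Int × Int), 2 ≤ j →
    (PySem.List.pyRange (j : Int) ((j : Int) + m) 1).foldl
      (fun res i => res.set i.toNat (res.getD (i - 1).toNat 0 + res.getD (i - 2).toNat 0))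
      (fibCollect j p ++ List.replicate m 0)
    = fibCollect (j + m) p := by
  induction m with
  | zero =>
    intro j p _
    rw [PySem.List.pyRange_one_eq_nil (by omega)]
    simp
  | succ m ih =>
    intro j p hj
    rw [PySem.List.pyRange_one_cons (by omega)]
    simp only [List.foldl_cons]
    have hlen : (fibCollect j p).length = j := fibCollect_length j p
    have hget1 : (fibCollect j p ++ List.replicate (m + 1) (0:Int)).getD (((j:Int) - 1).toNat) 0
        = (fibStep (j - 1) p).1 := by
      rw [show ((j:Int) - 1).toNat = j - 1 by omega]
      rw [List.getD_append _ _ _ _ (by omega)]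
      exact fibCollect_getD j (j - 1) p (by omega)
    have hget2 : (fibCollect j p ++ List.replicate (m + 1) (0:Int)).getD (((j:Int) - 2).toNat) 0
        = (fibStep (j - 2) p).1 := by
      rw [show ((j:Int) - 2).toNat = j - 2 by omega]
      rw [List.getD_append _ _ _ _ (by omega)]
      exact fibCollect_getD j (j - 2) p (by omega)
    rw [hget1, hget2]
    have hsum : (fibStep (j - 1) p).1 + (fibStep (j - 2) p).1 = (fibStep j p).1 := by
      have := fibStep_rec (j - 2) p
      rw [show j - 2 + 2 = j by omega, show j - 2 + 1 = j - 1 by omega] at this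
      omega
    have hset : (fibCollect j p ++ List.replicate (m + 1) (0:Int)).set ((j:Int)).toNat
          ((fibStep (j - 1) p).1 + (fibStep (j - 2) p).1)
        = fibCollect (j + 1) p ++ List.replicate m 0 := by
      rw [hsum, show ((j:Int)).toNat = j by omega,
        List.set_append_right _ _ (by omega)]
      rw [hlen, Nat.sub_self]
      rw [show List.replicate (m + 1) (0:Int) = 0 :: List.replicate m 0 from rfl]
      rw [List.set_cons_zero, fibCollect_snoc]
      simp
    rw [hset, show (j:Int) + (↑(m + 1)) = ((j:Int) + 1) + m by push_cast; ring,
      show (j:Int) + 1 = ((j + 1 : Nat) : Int) by push_cast; ring]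
    rw [ih (j + 1) p (by omega)]
    congr 1
    omega

-- ===== VERDICT (by name: the statement is the Claim_ definition above) =====
theorem fibonacci_matrix_spec : Claim_equal_fibonacci_matrix := by
  intro start length _ hpre
  obtain ⟨hs, hl⟩ := hpre
  unfold Spec_fibonacci_matrix fibonacci_matrix fibonacci_matrix_alt
  rw [if_neg (by omega), if_neg (by omega), if_neg (by omega), if_neg (by omega)]
  set p := fibStep start.toNat (0, 1) with hp
  dsimp only
  -- the matrix entries A reads are F(start) and F(start+1)
  have hentries :
      (if start = 0 then ((matrix_power pvFibStartMatrix start).2.2,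
          (matrix_power pvFibStartMatrix start).1.2)
        else ((matrix_power pvFibStartMatrix start).1.2,
          (matrix_power pvFibStartMatrix start).1.1)) = (p.1, p.2) := by
    by_cases h0 : start = 0
    · subst h0; rfl
    · rw [if_neg h0]
      by_cases h1 : start = 1
      · subst h1; rfl
      · rw [matrix_power_fib start (by omega)]
  by_cases hl1 : length = 1
  · subst hl1
    rw [PySem.List.pyRange_one_eq_nil (by norm_num)]
    simp only [List.foldl_nil, if_neg (show ¬((1:Int) > 1) by norm_num)]
    by_cases h0 : start = 0
    · subst h0; decide
    · rw [if_neg h0]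
      have h1 := congrArg Prod.fst hentries
      rw [if_neg h0] at h1
      simp only at h1
      rw [h1]
      rfl
  · -- length ≥ 2
    have hl2 : 2 ≤ length := by omega
    simp only [if_pos (show length > 1 by omega)]
    have hln : length.toNat = 2 + (length.toNat - 2) := by omega
    have hinit : ∀ x y : Int,
        ((List.replicate length.toNat (0:Int)).set 0 x).set 1 y
          = [x, y] ++ List.replicate (length.toNat - 2) 0 := by
      intro x y
      rw [hln, show 2 + (length.toNat - 2) = (length.toNat - 2) + 1 + 1 by omega]
      simp [List.replicate_succ]
    have hfc2 : fibCollect 2 p = [p.1, p.2] := rfl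
    have hbr :
        (if start = 0 then
            ((List.replicate length.toNat (0:Int)).set 0
              (matrix_power pvFibStartMatrix start).2.2).set 1
              (matrix_power pvFibStartMatrix start).1.2
          else
            ((List.replicate length.toNat (0:Int)).set 0
              (matrix_power pvFibStartMatrix start).1.2).set 1
              (matrix_power pvFibStartMatrix start).1.1)
        = fibCollect 2 p ++ List.replicate (length.toNat - 2) 0 := by
      rw [hfc2]
      by_cases h0 : start = 0
      · rw [if_pos h0]
        have h1 := congrArg Prod.fst hentries
        have h2 := congrArg Prod.snd hentries
        rw [if_pos h0] at h1 h2
        simp only at h1 h2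
        rw [h1, h2, hinit]
      · rw [if_neg h0]
        have h1 := congrArg Prod.fst hentries
        have h2 := congrArg Prod.snd hentries
        rw [if_neg h0] at h1 h2
        simp only at h1 h2
        rw [h1, h2, hinit]
    rw [hbr]
    have hfill := fill_spec (length.toNat - 2) 2 p (by norm_num)
    rw [show (((2:Nat)) : Int) = (2:Int) by norm_num,
      show (2:Int) + ((length.toNat - 2 : Nat) : Int) = length by omega,
      show (2:Nat) + (length.toNat - 2) = length.toNat by omega] at hfill
    exact hfill
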